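-- pv_equiv track=rewrite | github.com/Qenszu/workshop | python/WDI/zestaw_2/zad_71.py | roznica_ciagow
-- ===== SOURCE A (Python) =====
-- end = None
--
-- def roznica_ciagow(tab, n):
--     max_dod_dl_ciagu = 0
--     max_uje_dl_ciagu = 0
--
--     for i in range(n - 1):
--         dl_ciagu = dlugosc_ciagu(tab, i, n)
--
--         if max_dod_dl_ciagu < dl_ciagu:
--             max_dod_dl_ciagu = dl_ciagu
--
--         elif max_uje_dl_ciagu > dl_ciagu:
--             max_uje_dl_ciagu = dl_ciagu
--     end
--
--     return abs(max_dod_dl_ciagu + max_uje_dl_ciagu)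
--
-- def dlugosc_ciagu(tab, index, n):
--     dl_ciagu = 1
--     roznica = tab[index+1] - tab[index]
--     index += 1
--
--     while index < n-1:
--         if tab[index] + roznica == tab[index + 1]:
--             dl_ciagu += 1
--             index += 1
--         else:
--             break
--     end
--
--     if roznica < 0:
--         return -(dl_ciagu + 1)
--     else:
--         return dl_ciagu + 1
--
-- tab = [1, 2, 3, -1, -2, -3, -4, -5]
--
-- n = len(tab)
-- ===== SOURCE B (Python) =====
-- def roznica_ciagow(tab, n):
--     best_pos = 0
--     best_neg = 0
--     prev = None
--     cur = 1
--     for i in range(max(0, n - 1)):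
--         d = tab[i + 1] - tab[i]
--         if prev is not None and d == prev:
--             cur += 1
--         else:
--             cur = 1
--             prev = d
--         run = cur + 1
--         if d < 0:
--             if run > best_neg:
--                 best_neg = run
--         else:
--             if run > best_pos:
--                 best_pos = run
--     return abs(best_pos - best_neg)
-- ===== Notes on version B (the rewrite author's own statement) =====
-- stated objective: faster
-- what changed: Replaced the quadratic per-index forward run scan (dlugosc_ciagu restarted at every i) by a single pass over consecutive differences that tracks the current run length ending at i and the best non-negative/negative run, so no inner rescan remains.
import Mathlib
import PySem

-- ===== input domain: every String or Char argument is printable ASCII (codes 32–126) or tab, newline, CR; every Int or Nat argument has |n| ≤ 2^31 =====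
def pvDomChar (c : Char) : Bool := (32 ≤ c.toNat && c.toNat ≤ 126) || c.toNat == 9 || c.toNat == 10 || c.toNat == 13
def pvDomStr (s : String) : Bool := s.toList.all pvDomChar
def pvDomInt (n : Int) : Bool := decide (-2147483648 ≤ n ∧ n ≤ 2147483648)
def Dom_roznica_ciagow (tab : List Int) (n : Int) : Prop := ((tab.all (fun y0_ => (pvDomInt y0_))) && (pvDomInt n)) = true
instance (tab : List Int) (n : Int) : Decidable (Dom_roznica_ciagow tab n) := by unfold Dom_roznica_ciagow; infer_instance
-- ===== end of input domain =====

-- B replaces A's quadratic per-start forward run scan by one linear pass over consecutive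
-- differences tracking the current run ending at each index (objective: faster, asymptotic).

-- ===== PORT A =====
-- the while-loop of dlugosc_ciagu (index advances while the difference repeats, capped at n-1)
def pvDlugoscLoop (tab : List Int) (n roznica index dl : Int) : Int :=
  if _h : index < n - 1 then
    if PySem.List.pyGetD tab index 0 + roznica = PySem.List.pyGetD tab (index + 1) 0 then
      pvDlugoscLoop tab n roznica (index + 1) (dl + 1)
    else dl
  else dl
termination_by (n - 1 - index).toNat
decreasing_by omega

def pvDlugoscCiagu (tab : List Int) (index n : Int) : Int :=
  let roznica := PySem.List.pyGetD tab (index + 1) 0 - PySem.List.pyGetD tab index 0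
  let dl := pvDlugoscLoop tab n roznica (index + 1) 1
  if roznica < 0 then -(dl + 1) else dl + 1

def roznica_ciagow (tab : List Int) (n : Int) : Int :=
  let st := (PySem.List.pyRange 0 (n - 1) 1).foldl
    (fun (s : Int × Int) (i : Int) =>
      let dl := pvDlugoscCiagu tab i n
      if s.1 < dl then (dl, s.2) else if s.2 > dl then (s.1, dl) else s)
    (0, 0)
  |st.1 + st.2|

-- ===== PORT B =====
-- state: (prev, cur, best_pos, best_neg)
def roznica_ciagow_alt (tab : List Int) (n : Int) : Int :=
  let st := (PySem.List.pyRange 0 (max 0 (n - 1)) 1).foldl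
    (fun (s : Option Int × Int × Int × Int) (i : Int) =>
      let d := PySem.List.pyGetD tab (i + 1) 0 - PySem.List.pyGetD tab i 0
      let cur := if s.1 = some d then s.2.1 + 1 else 1
      let run := cur + 1
      if d < 0 then (some d, cur, s.2.2.1, if run > s.2.2.2 then run else s.2.2.2)
      else (some d, cur, (if run > s.2.2.1 then run else s.2.2.1), s.2.2.2))
    (none, 1, 0, 0)
  |st.2.2.1 - st.2.2.2|

-- ===== PRECONDITION & SPEC =====
-- Pre_ excludes exactly the inputs where the Python A raises IndexError (2 ≤ n and n > len(tab)).
def Pre_roznica_ciagow (tab : List Int) (n : Int) : Prop := n ≤ (tab.length : Int) ∨ n ≤ 1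
instance (tab : List Int) (n : Int) : Decidable (Pre_roznica_ciagow tab n) := by unfold Pre_roznica_ciagow; infer_instance
def pvWitness_roznica_ciagow : List Int × Int := ([1, 2, 3, -1, -2, -3, -4, -5], 8)

def Spec_roznica_ciagow (tab : List Int) (n : Int) (out : Int) : Prop := out = roznica_ciagow_alt tab n
instance (tab : List Int) (n : Int) (out : Int) : Decidable (Spec_roznica_ciagow tab n out) := by unfold Spec_roznica_ciagow; infer_instance

-- ===== CLAIM (what is proved, stated in full; the proofs are below) =====
def Claim_equal_roznica_ciagow : Prop := ∀ (tab : List Int) (n : Int), Dom_roznica_ciagow tab n → Pre_roznica_ciagow tab n → Spec_roznica_ciagow tab n (roznica_ciagow tab n)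

-- ===== LEMMAS AND PROOFS =====

-- the j-th consecutive difference
def pvDif (tab : List Int) (j : Nat) : Int :=
  PySem.List.pyGetD tab ((j : Int) + 1) 0 - PySem.List.pyGetD tab (j : Int) 0

-- number of consecutive indices k ≥ j, k < m, with pvDif tab k = p (forward run count)
def pvF (tab : List Int) (m : Nat) (p : Int) (j : Nat) : Int :=
  if _h : j < m then (if pvDif tab j = p then 1 + pvF tab m p (j + 1) else 0) else 0
termination_by m - j

-- length of the equal-difference run ending at index k-1 (B's `cur` after k steps)
def pvG (tab : List Int) : Nat → Int
  | 0 => 1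
  | 1 => 1
  | (k + 2) => if pvDif tab k = pvDif tab (k + 1) then pvG tab (k + 1) + 1 else 1

-- A-side prefix best: max over j < k with q (dif j) of 2 + forward run from j+1
def pvMP (tab : List Int) (m : Nat) (q : Int → Bool) : Nat → Int
  | 0 => 0
  | (k + 1) => max (pvMP tab m q k) (if q (pvDif tab k) then 2 + pvF tab m (pvDif tab k) (k + 1) else 0)

-- B-side prefix best: max over j < k with q (dif j) of backward run ending at j, plus one
def pvBP (tab : List Int) (q : Int → Bool) : Nat → Int
  | 0 => 0
  | (k + 1) => max (pvBP tab q k) (if q (pvDif tab k) then pvG tab (k + 1) + 1 else 0)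

lemma pvF_nonneg (tab : List Int) (m : Nat) (p : Int) (j : Nat) : 0 ≤ pvF tab m p j := by
  fun_induction pvF tab m p j <;> omega

lemma pvG_pos (tab : List Int) (k : Nat) : 1 ≤ pvG tab k := by
  fun_induction pvG tab k
  all_goals first
    | (simp only [pvG]; first | omega | (split <;> omega))
    | omega

lemma pvMP_nonneg (tab : List Int) (m : Nat) (q : Int → Bool) (k : Nat) : 0 ≤ pvMP tab m q k := by
  induction k with
  | zero => simp [pvMP]
  | succ k ih => simp only [pvMP]; omega

lemma pvBP_nonneg (tab : List Int) (q : Int → Bool) (k : Nat) : 0 ≤ pvBP tab q k := by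
  induction k with
  | zero => simp [pvBP]
  | succ k ih => simp only [pvBP]; omega

lemma pvG_succ (tab : List Int) (k : Nat) :
    pvG tab (k + 1) = if 1 ≤ k ∧ pvDif tab (k - 1) = pvDif tab k then pvG tab k + 1 else 1 := by
  cases k with
  | zero => simp [pvG]
  | succ j => simp only [pvG, Nat.add_sub_cancel]; split_ifs with h1 h2 <;> simp_all <;> omega

lemma pvDlugoscLoop_eq (tab : List Int) (n p : Int) :
    ∀ (fuel j : Nat) (dl : Int), (n - 1).toNat - j = fuel →
      pvDlugoscLoop tab n p (j : Int) dl = dl + pvF tab (n - 1).toNat p j := by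
  intro fuel
  induction fuel with
  | zero =>
    intro j dl h
    have h1 : ¬ ((j : Int) < n - 1) := by omega
    have h2 : ¬ (j < (n - 1).toNat) := by omega
    rw [pvDlugoscLoop, pvF, dif_neg h1, dif_neg h2]
    omega
  | succ f ih =>
    intro j dl h
    have hj : (j : Int) < n - 1 := by omega
    have hj' : j < (n - 1).toNat := by omega
    rw [pvDlugoscLoop, pvF]
    simp only [dif_pos hj, dif_pos hj']
    by_cases hc : PySem.List.pyGetD tab (j : Int) 0 + p = PySem.List.pyGetD tab ((j : Int) + 1) 0
    · have hd : pvDif tab j = p := by unfold pvDif; omega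
      have hcast : ((j : Int) + 1) = ((j + 1 : Nat) : Int) := by push_cast; ring
      rw [if_pos hc, if_pos hd, hcast, ih (j + 1) (dl + 1) (by omega)]
      omega
    · have hd : ¬ pvDif tab j = p := by unfold pvDif; omega
      rw [if_neg hc, if_neg hd]
      omega

lemma pvDlugoscCiagu_eq (tab : List Int) (n : Int) (k : Nat) :
    pvDlugoscCiagu tab (k : Int) n =
      if pvDif tab k < 0 then -(2 + pvF tab (n - 1).toNat (pvDif tab k) (k + 1))
      else 2 + pvF tab (n - 1).toNat (pvDif tab k) (k + 1) := by
  have hcast : ((k : Int) + 1) = ((k + 1 : Nat) : Int) := by push_cast; ring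
  have hloop : pvDlugoscLoop tab n (pvDif tab k) ((k : Int) + 1) 1
      = 1 + pvF tab (n - 1).toNat (pvDif tab k) (k + 1) := by
    rw [hcast]
    exact pvDlugoscLoop_eq tab n (pvDif tab k) ((n - 1).toNat - (k + 1)) (k + 1) 1 rfl
  have hr : pvDif tab k = PySem.List.pyGetD tab ((k : Int) + 1) 0 - PySem.List.pyGetD tab (k : Int) 0 := rfl
  simp only [pvDlugoscCiagu]
  rw [← hr, hloop]
  split_ifs <;> omega

lemma pvAfold (tab : List Int) (n : Int) (K : Nat) :
    (List.range K).foldl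
      (fun (s : Int × Int) (i : Nat) =>
        let dl := pvDlugoscCiagu tab (i : Int) n
        if s.1 < dl then (dl, s.2) else if s.2 > dl then (s.1, dl) else s)
      (0, 0)
    = (pvMP tab (n - 1).toNat (fun d => decide (0 ≤ d)) K,
       -(pvMP tab (n - 1).toNat (fun d => decide (d < 0)) K)) := by
  induction K with
  | zero => simp [pvMP]
  | succ k ih =>
    rw [List.range_succ, List.foldl_append, ih]
    simp only [List.foldl_cons, List.foldl_nil, pvDlugoscCiagu_eq]
    have hF := pvF_nonneg tab (n - 1).toNat (pvDif tab k) (k + 1)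
    have h1 := pvMP_nonneg tab (n - 1).toNat (fun d => decide (0 ≤ d)) k
    have h2 := pvMP_nonneg tab (n - 1).toNat (fun d => decide (d < 0)) k
    simp only [pvMP]
    by_cases hd : pvDif tab k < 0 <;>
      simp only [hd, if_pos, if_neg, decide_eq_true_eq, not_lt, decide_true, decide_false,
        if_true, if_false, Prod.mk.injEq] <;>
      split_ifs <;> simp_all <;> omega

lemma pvBfold (tab : List Int) (n : Int) (K : Nat) :
    (List.range K).foldl
      (fun (s : Option Int × Int × Int × Int) (i : Nat) =>
        let d := PySem.List.pyGetD tab ((i : Int) + 1) 0 - PySem.List.pyGetD tab (i : Int) 0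
        let cur := if s.1 = some d then s.2.1 + 1 else 1
        let run := cur + 1
        if d < 0 then (some d, cur, s.2.2.1, if run > s.2.2.2 then run else s.2.2.2)
        else (some d, cur, (if run > s.2.2.1 then run else s.2.2.1), s.2.2.2))
      (none, 1, 0, 0)
    = ((if K = 0 then none else some (pvDif tab (K - 1))), pvG tab K,
       pvBP tab (fun d => decide (0 ≤ d)) K, pvBP tab (fun d => decide (d < 0)) K) := by
  induction K with
  | zero => simp [pvG, pvBP]
  | succ k ih =>
    rw [List.range_succ, List.foldl_append, ih]
    simp only [List.foldl_cons, List.foldl_nil]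
    have hd : PySem.List.pyGetD tab ((k : Int) + 1) 0 - PySem.List.pyGetD tab (k : Int) 0 = pvDif tab k := rfl
    have hcur : (if (if k = 0 then none else some (pvDif tab (k - 1))) = some (pvDif tab k)
        then pvG tab k + 1 else 1) = pvG tab (k + 1) := by
      rw [pvG_succ]
      by_cases hk : k = 0
      · simp [hk]
      · simp only [if_neg hk, Option.some.injEq]
        split_ifs with h1 h2 <;> simp_all <;> omega
    have hp := pvBP_nonneg tab (fun d => decide (0 ≤ d)) k
    have hn := pvBP_nonneg tab (fun d => decide (d < 0)) k
    have hg := pvG_pos tab (k + 1)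
    simp only [hd, hcur, pvBP, Nat.add_sub_cancel, Nat.succ_ne_zero, if_false,
      Prod.mk.injEq, decide_eq_true_eq]
    by_cases h : pvDif tab k < 0
    · rw [if_pos h]
      have h2 : ¬ (0 ≤ pvDif tab k) := by omega
      simp only [if_neg h2, if_pos h, Prod.mk.injEq]
      refine ⟨trivial, trivial, ?_, ?_⟩ <;> (try split_ifs) <;> omega
    · rw [if_neg h]
      have h2 : 0 ≤ pvDif tab k := by omega
      simp only [if_neg h, if_pos h2, Prod.mk.injEq]
      refine ⟨trivial, trivial, ?_, ?_⟩ <;> (try split_ifs) <;> omega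

lemma pvBP_ge (tab : List Int) (q : Int → Bool) (k : Nat) (hk : 1 ≤ k) :
    (if q (pvDif tab (k - 1)) then pvG tab k + 1 else 0) ≤ pvBP tab q k := by
  cases k with
  | zero => omega
  | succ j =>
    simp only [pvBP, Nat.add_sub_cancel]
    exact le_max_right _ _

lemma pvInv (tab : List Int) (m : Nat) (q : Int → Bool) :
    ∀ k, k ≤ m →
      pvMP tab m q k = max (pvBP tab q k)
        (if 1 ≤ k ∧ q (pvDif tab (k - 1)) = true
         then pvG tab k + pvF tab m (pvDif tab (k - 1)) k + 1 else 0) := by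
  intro k
  induction k with
  | zero => simp [pvMP, pvBP]
  | succ k ih =>
    intro hk
    have hkm : k < m := by omega
    have hIH := ih (by omega)
    have hG1 := pvG_pos tab k
    have hG2 := pvG_pos tab (k + 1)
    have hF1 := pvF_nonneg tab m (pvDif tab k) (k + 1)
    have hBP0 := pvBP_nonneg tab q k
    have hFk : pvF tab m (pvDif tab (k - 1)) k =
        if pvDif tab k = pvDif tab (k - 1) then 1 + pvF tab m (pvDif tab (k - 1)) (k + 1) else 0 := by
      rw [pvF]; simp [hkm]
    simp only [pvMP, pvBP, Nat.add_sub_cancel, hIH, pvG_succ]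
    by_cases hk0 : 1 ≤ k
    · -- k ≥ 1: previous difference exists
      have hbge := pvBP_ge tab q k hk0
      by_cases heq : pvDif tab (k - 1) = pvDif tab k
      · -- same block continues
        have hFk' : pvF tab m (pvDif tab (k - 1)) k = 1 + pvF tab m (pvDif tab (k - 1)) (k + 1) := by
          rw [hFk, if_pos heq.symm]
        rw [heq] at hFk' ⊢
        by_cases hq : q (pvDif tab k) = true <;>
          simp only [hk0, heq, hq, true_and, and_true, if_true, if_false, le_refl,
            Nat.le_add_left, Nat.le_refl, and_self, if_pos, if_neg, not_true, not_false_iff,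
            Nat.succ_le_succ] <;>
          simp_all <;> omega
      · -- new block starts at k
        have hFk' : pvF tab m (pvDif tab (k - 1)) k = 0 := by
          rw [hFk, if_neg (fun h => heq h.symm)]
        rw [hFk'] at hIH ⊢
        by_cases hq : q (pvDif tab k) = true <;> by_cases hq' : q (pvDif tab (k - 1)) = true <;>
          simp_all <;> omega
    · -- k = 0
      have hk00 : k = 0 := by omega
      subst hk00
      by_cases hq : q (pvDif tab 0) = true <;> simp_all [pvBP, pvG] <;> omega

lemma pvMP_eq_pvBP (tab : List Int) (m : Nat) (q : Int → Bool) :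
    pvMP tab m q m = pvBP tab q m := by
  have h := pvInv tab m q m (le_refl m)
  have hFm : pvF tab m (pvDif tab (m - 1)) m = 0 := by rw [pvF]; simp
  rw [hFm] at h
  rw [h]
  by_cases hm : 1 ≤ m
  · have hge := pvBP_ge tab q m hm
    split_ifs at hge ⊢ with h1 h2 <;> simp_all <;> omega
  · have : m = 0 := by omega
    subst this
    simp [pvBP]

-- ===== VERDICT (by name: the statement is the Claim_ definition above) =====
theorem roznica_ciagow_spec : Claim_equal_roznica_ciagow := by
  intro tab n _hdom _hpre
  unfold Spec_roznica_ciagow roznica_ciagow roznica_ciagow_alt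
  have hmax : max 0 (n - 1) - 0 = (((n - 1).toNat : Int)) := by omega
  have hA : n - 1 - 0 = n - 1 := by ring
  rw [PySem.List.pyRange_one, PySem.List.pyRange_one, hA, hmax]
  simp only [Int.toNat_natCast, List.foldl_map, zero_add]
  rw [pvAfold tab n, pvBfold tab n]
  rw [pvMP_eq_pvBP, pvMP_eq_pvBP]
  congr 1
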